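-- pv_equiv track=rewrite | github.com/ChevinCherry/WordleAI | utils.py | checkWrongPlace
-- ===== SOURCE A (Python) =====
-- def checkWrongPlace(answer, guess, letter, upToChar):
--     if letter not in answer:
--         return False
--     numBothMatch = 0
--     numGuessMatch = 0
--     numAnswerMatch = 0
--     numCurGuessMatch = 0
--     for index, gLetter in enumerate(guess):
--         guessMatch = gLetter == letter
--         answerMatch = answer[index] == letter
--         if guessMatch and answerMatch:
--             numBothMatch += 1
--         if answerMatch:
--             numAnswerMatch += 1
--         if guessMatch:
--             numGuessMatch += 1
--             if index <= upToChar: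
--                 numCurGuessMatch += 1
--
--     return numGuessMatch > numBothMatch and not numCurGuessMatch > numAnswerMatch
-- ===== SOURCE B (Python) =====
-- def checkWrongPlace(answer, guess, letter, upToChar):
--     if letter not in answer:
--         return False
--     idxs = range(len(guess))
--     apos = [i for i in idxs if answer[i] == letter]
--     gpos = [i for i in idxs if guess[i] == letter]
--     mismatch = any(i not in apos for i in gpos)
--     early = sum(1 for i in gpos if i <= upToChar)
--     return mismatch and early <= len(apos)
-- ===== Notes on version B (the rewrite author's own statement) =====
-- stated objective: alternative
-- what changed: A's single fused loop maintaining four integer counters is replaced by building the position-index lists apos/gpos of where letter occurs in answer/guess, testing the wrong-place condition existentially with any(i not in apos for i in gpos) instead of A's count comparison numGuessMatch > numBothMatch (equivalent since both-match positions are exactly the gpos elements lying in apos), and comparing the early-guess tally against len(apos).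
import Mathlib
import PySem

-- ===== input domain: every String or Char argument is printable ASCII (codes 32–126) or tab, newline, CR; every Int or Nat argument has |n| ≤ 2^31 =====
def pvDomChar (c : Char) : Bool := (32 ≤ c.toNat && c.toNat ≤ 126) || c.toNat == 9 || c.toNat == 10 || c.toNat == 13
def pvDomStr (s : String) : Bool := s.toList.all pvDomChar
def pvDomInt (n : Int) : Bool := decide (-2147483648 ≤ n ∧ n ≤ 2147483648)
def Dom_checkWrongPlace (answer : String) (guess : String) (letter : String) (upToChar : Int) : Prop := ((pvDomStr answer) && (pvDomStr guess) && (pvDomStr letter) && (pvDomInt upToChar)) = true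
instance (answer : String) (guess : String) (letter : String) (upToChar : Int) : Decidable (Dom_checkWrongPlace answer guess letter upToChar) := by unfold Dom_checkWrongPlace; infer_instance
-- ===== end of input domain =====

-- B replaces A's four fused counters by position-index lists (apos/gpos) and an existential
-- mismatch test `any(i not in apos for i in gpos)` in place of the count comparison
-- numGuessMatch > numBothMatch (objective: alternative).
-- Both Pythons raise IndexError when letter ∈ answer and guess is longer than answer; Pre_ excludes exactly that.

-- ===== PORT A =====
def checkWrongPlace (answer : String) (guess : String) (letter : String) (upToChar : Int) : Bool :=
  -- `if letter not in answer: return False`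
  if PySem.Str.isIn letter answer = false then false
  else
    -- fused loop over enumerate(guess) with four counters; answer[index] is compared as a
    -- 1-char string with `letter` (none = IndexError, excluded by Pre_; treated as non-match here)
    let r := (PySem.List.enumerate guess.toList 0).foldl
      (fun (st : Int × Int × Int × Int) (p : Int × Char) =>
        let guessMatch : Bool := decide (letter.toList = [p.2])
        let answerMatch : Bool := decide ((PySem.List.pyGet? answer.toList p.1).map (fun a => [a]) = some letter.toList)
        let nb := if guessMatch && answerMatch then st.1 + 1 else st.1
        let na := if answerMatch then st.2.2.1 + 1 else st.2.2.1
        let ng := if guessMatch then st.2.1 + 1 else st.2.1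
        let nc := if guessMatch then (if p.1 ≤ upToChar then st.2.2.2 + 1 else st.2.2.2) else st.2.2.2
        (nb, ng, na, nc))
      ((0 : Int), (0 : Int), (0 : Int), (0 : Int))
    decide (r.2.1 > r.1 ∧ ¬ r.2.2.2 > r.2.2.1)

-- ===== PORT B =====
def checkWrongPlace_alt (answer : String) (guess : String) (letter : String) (upToChar : Int) : Bool :=
  if PySem.Str.isIn letter answer = false then false
  else
    -- idxs = range(len(guess)); apos/gpos = index lists where answer[i]/guess[i] equals letter
    let idxs := PySem.List.pyRange 0 (guess.toList.length : Int) 1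
    let apos := idxs.filter (fun i => decide ((PySem.List.pyGet? answer.toList i).map (fun c => [c]) = some letter.toList))
    let gpos := idxs.filter (fun i => decide ((PySem.List.pyGet? guess.toList i).map (fun c => [c]) = some letter.toList))
    -- mismatch = any(i not in apos for i in gpos)
    let mismatch := gpos.any (fun i => !(apos.contains i))
    -- early = sum(1 for i in gpos if i <= upToChar)
    let early : Int := ((gpos.filter (fun i => decide (i ≤ upToChar))).length : Int)
    mismatch && decide (early ≤ (apos.length : Int))

-- ===== PRECONDITION & SPEC =====
-- Pre_ excludes exactly the inputs where Python A raises IndexError: letter occurs in answer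
-- (so the loop runs) and guess is longer than answer (so answer[index] goes out of range).
def Pre_checkWrongPlace (answer : String) (guess : String) (letter : String) (upToChar : Int) : Prop :=
  PySem.Str.isIn letter answer = true → guess.toList.length ≤ answer.toList.length
instance (answer : String) (guess : String) (letter : String) (upToChar : Int) : Decidable (Pre_checkWrongPlace answer guess letter upToChar) := by unfold Pre_checkWrongPlace; infer_instance

def pvWitness_checkWrongPlace : String × String × String × Int := ("crane", "carve", "a", 2)

def Spec_checkWrongPlace (answer : String) (guess : String) (letter : String) (upToChar : Int) (out : Bool) : Prop := out = checkWrongPlace_alt answer guess letter upToChar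
instance (answer : String) (guess : String) (letter : String) (upToChar : Int) (out : Bool) : Decidable (Spec_checkWrongPlace answer guess letter upToChar out) := by unfold Spec_checkWrongPlace; infer_instance

-- ===== CLAIM (what is proved, stated in full; the proofs are below) =====
def Claim_equal_checkWrongPlace : Prop := ∀ (answer : String) (guess : String) (letter : String) (upToChar : Int), Dom_checkWrongPlace answer guess letter upToChar → Pre_checkWrongPlace answer guess letter upToChar → Spec_checkWrongPlace answer guess letter upToChar (checkWrongPlace answer guess letter upToChar)

-- ===== LEMMAS AND PROOFS =====

-- A's fused loop: each of the four counters is the initial value plus a countP over the enumerated list.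
theorem foldA_eq (L a : List Char) (u : Int) (l : List (Int × Char)) (b g n c : Int) :
    l.foldl
      (fun (st : Int × Int × Int × Int) (p : Int × Char) =>
        let guessMatch : Bool := decide (L = [p.2])
        let answerMatch : Bool := decide ((PySem.List.pyGet? a p.1).map (fun x => [x]) = some L)
        let nb := if guessMatch && answerMatch then st.1 + 1 else st.1
        let na := if answerMatch then st.2.2.1 + 1 else st.2.2.1
        let ng := if guessMatch then st.2.1 + 1 else st.2.1
        let nc := if guessMatch then (if p.1 ≤ u then st.2.2.2 + 1 else st.2.2.2) else st.2.2.2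
        (nb, ng, na, nc)) (b, g, n, c)
    = (b + (l.countP (fun p => decide (L = [p.2]) && decide ((PySem.List.pyGet? a p.1).map (fun x => [x]) = some L)) : Int),
       g + (l.countP (fun p => decide (L = [p.2])) : Int),
       n + (l.countP (fun p => decide ((PySem.List.pyGet? a p.1).map (fun x => [x]) = some L)) : Int),
       c + (l.countP (fun p => decide (L = [p.2]) && decide (p.1 ≤ u)) : Int)) := by
  induction l generalizing b g n c with
  | nil => simp
  | cons x xs ih =>
    simp only [List.foldl_cons, List.countP_cons]
    rw [ih]
    by_cases h1 : L = [x.2] <;> by_cases h2 : (PySem.List.pyGet? a x.1).map (fun y => [y]) = some L <;>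
      by_cases h3 : x.1 ≤ u <;> simp [h1, h2, h3, Prod.ext_iff] <;>
      first | omega | (split_ifs <;> omega)

-- a countP over enumerate(guess) is the same countP over range(len(guess)), reading the char by index
theorem enumCountP (g : List Char) (P : Int × Char → Bool) :
    (PySem.List.enumerate g 0).countP P
      = (PySem.List.pyRange 0 (g.length : Int) 1).countP (fun j => P (j, PySem.List.pyGetD g j 'a')) := by
  rw [show PySem.List.enumerate g 0 = (PySem.List.pyRange 0 (g.length : Int) 1).map (fun j => (j, PySem.List.pyGetD g j 'a')) by
        have h := PySem.List.enumerate_eq_map_pyRange g 'a'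
        simpa [PySem.List.len_eq] using h]
  rw [List.countP_map]; rfl

-- on an in-range index, the enumerate-style char test equals the pyGet?-style test
theorem charTest_eq (g L : List Char) (i : Int) (h0 : 0 ≤ i) (h1 : i < (g.length : Int)) :
    decide (L = [PySem.List.pyGetD g i 'a'])
      = decide ((PySem.List.pyGet? g i).map (fun c => [c]) = some L) := by
  rw [PySem.List.pyGetD_eq_getElem g 'a' h0 h1, PySem.List.pyGet?_eq_some_getElem _ h0 h1]
  simp only [Option.map_some, decide_eq_decide, Option.some_inj]
  exact ⟨fun h => h.symm, fun h => h.symm⟩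

-- countP p < length iff some element fails p
theorem countP_lt_iff_any (l : List Int) (p : Int → Bool) :
    l.countP p < l.length ↔ l.any (fun i => !p i) = true := by
  rw [List.any_eq_true]
  have hle := List.countP_le_length (l := l) (p := p)
  constructor
  · intro h
    by_contra hc
    push_neg at hc
    have : l.countP p = l.length := List.countP_eq_length.mpr (fun a ha => by
      have := hc a ha; simpa using this)
    omega
  · rintro ⟨i, hi, h⟩
    by_contra hc
    have heq : l.countP p = l.length := by omega
    have := List.countP_eq_length.mp heq i hi
    simp [this] at h

-- the assembled equivalence of the two bodies on the non-early-return branch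
theorem key (a g L : List Char) (u : Int) :
    decide (((PySem.List.enumerate g 0).countP (fun p => decide (L = [p.2])) : Int)
              > ((PySem.List.enumerate g 0).countP (fun p => decide (L = [p.2]) && decide ((PySem.List.pyGet? a p.1).map (fun x => [x]) = some L)) : Int)
            ∧ ¬ ((PySem.List.enumerate g 0).countP (fun p => decide (L = [p.2]) && decide (p.1 ≤ u)) : Int)
              > ((PySem.List.enumerate g 0).countP (fun p => decide ((PySem.List.pyGet? a p.1).map (fun x => [x]) = some L)) : Int))
    = ((((PySem.List.pyRange 0 (g.length : Int) 1).filter (fun i => decide ((PySem.List.pyGet? g i).map (fun c => [c]) = some L))).any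
          (fun i => !(((PySem.List.pyRange 0 (g.length : Int) 1).filter (fun i => decide ((PySem.List.pyGet? a i).map (fun c => [c]) = some L))).contains i)))
        && decide ((((((PySem.List.pyRange 0 (g.length : Int) 1).filter (fun i => decide ((PySem.List.pyGet? g i).map (fun c => [c]) = some L))).filter (fun i => decide (i ≤ u))).length : Int))
              ≤ ((((PySem.List.pyRange 0 (g.length : Int) 1).filter (fun i => decide ((PySem.List.pyGet? a i).map (fun c => [c]) = some L))).length : Int)))) := by
  set idxs := PySem.List.pyRange 0 (g.length : Int) 1 with hidxs
  have hmem : ∀ i ∈ idxs, 0 ≤ i ∧ i < (g.length : Int) := by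
    intro i hi; exact PySem.List.mem_pyRange_one.mp hi
  set pa : Int → Bool := fun i => decide ((PySem.List.pyGet? a i).map (fun c => [c]) = some L) with hpa
  set pg : Int → Bool := fun i => decide ((PySem.List.pyGet? g i).map (fun c => [c]) = some L) with hpg
  have c2 : (PySem.List.enumerate g 0).countP (fun p => decide (L = [p.2])) = (idxs.filter pg).length := by
    rw [enumCountP, ← List.countP_eq_length_filter]
    exact List.countP_congr (fun i hi => by
      obtain ⟨h0, h1⟩ := hmem i hi
      simp [charTest_eq g L i h0 h1, hpg])
  have c3 : (PySem.List.enumerate g 0).countP (fun p => decide ((PySem.List.pyGet? a p.1).map (fun x => [x]) = some L)) = (idxs.filter pa).length := by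
    rw [enumCountP, ← List.countP_eq_length_filter]
  have c1 : (PySem.List.enumerate g 0).countP (fun p => decide (L = [p.2]) && decide ((PySem.List.pyGet? a p.1).map (fun x => [x]) = some L)) = (idxs.filter pg).countP pa := by
    rw [enumCountP, List.countP_filter]
    exact List.countP_congr (fun i hi => by
      obtain ⟨h0, h1⟩ := hmem i hi
      simp [charTest_eq g L i h0 h1, hpg, hpa, Bool.and_comm])
  have c4 : (PySem.List.enumerate g 0).countP (fun p => decide (L = [p.2]) && decide (p.1 ≤ u)) = ((idxs.filter pg).filter (fun i => decide (i ≤ u))).length := by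
    rw [enumCountP, ← List.countP_eq_length_filter, List.countP_filter]
    exact List.countP_congr (fun i hi => by
      obtain ⟨h0, h1⟩ := hmem i hi
      simp [charTest_eq g L i h0 h1, hpg, Bool.and_comm])
  have hcontains : ∀ i ∈ idxs.filter pg, (idxs.filter pa).contains i = pa i := by
    intro i hi
    have hiidx : i ∈ idxs := (List.mem_filter.mp hi).1
    by_cases h : pa i <;> simp [List.mem_filter, hiidx, h]
  have hmis : (idxs.filter pg).any (fun i => !((idxs.filter pa).contains i))
      = decide ((idxs.filter pg).countP pa < (idxs.filter pg).length) := by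
    rw [Bool.eq_iff_iff, List.any_eq_true, decide_eq_true_iff, countP_lt_iff_any, List.any_eq_true]
    constructor
    · rintro ⟨i, hi, h⟩; exact ⟨i, hi, by rw [← hcontains i hi]; exact h⟩
    · rintro ⟨i, hi, h⟩; exact ⟨i, hi, by rw [hcontains i hi]; exact h⟩
  rw [c1, c2, c3, c4, hmis]
  rw [Bool.eq_iff_iff]
  simp only [Bool.and_eq_true, decide_eq_true_eq]
  omega

-- ===== VERDICT (by name: the statement is the Claim_ definition above) =====
theorem checkWrongPlace_spec : Claim_equal_checkWrongPlace := by
  intro answer guess letter u _ _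
  unfold Spec_checkWrongPlace checkWrongPlace checkWrongPlace_alt
  by_cases hin : PySem.Str.isIn letter answer = false
  · simp only [if_pos hin]
  · simp only [if_neg hin, foldA_eq, zero_add]
    exact key answer.toList guess.toList letter.toList u
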